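-- pv_equiv track=rewrite | github.com/eunjinii/ga_mapper | run_genetic_algorithm.py | get_matching_dim_pairs
-- ===== SOURCE A (Python) =====
-- def get_matching_dim_pairs(child1, child2, start, end):
--     """
--     child1, child2 내의 동일 차원 이름을 갖는 인덱스 쌍을 반환한다.
--     start, end 범위 내에서 탐색.
--     반환 예: [(idx1_child1, idx2_child2), ...]
--     """
--     dim_map_child2 = {}
--     # child2의 차원별 인덱스 모음
--     for i in range(start, end):
--         dim_name = child2[i][0]
--         if dim_name not in dim_map_child2:
--             dim_map_child2[dim_name] = []
--         dim_map_child2[dim_name].append(i)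
--
--     matching_pairs = []
--     # child1의 각 인덱스에 대해 동일 차원 이름을 child2에서 찾는다
--     for i in range(start, end):
--         dim_name = child1[i][0]
--         if dim_name in dim_map_child2:
--             for j in dim_map_child2[dim_name]:
--                 matching_pairs.append((i, j))
--
--     return matching_pairs
-- ===== SOURCE B (Python) =====
-- def get_matching_dim_pairs(child1, child2, start, end):
--     matching_pairs = []
--     for i in range(start, end):
--         name = child1[i][0]
--         for j in range(start, end):
--             if child2[j][0] == name:
--                 matching_pairs.append((i, j))
--     return matching_pairs
-- ===== Notes on version B (the rewrite author's own statement) =====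
-- stated objective: simpler
-- what changed: Dropped the precomputed dict mapping dimension names to child2 index lists and replaced the index-then-lookup strategy with a direct nested double scan of the range, appending (i, j) whenever the names match.
import Mathlib
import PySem

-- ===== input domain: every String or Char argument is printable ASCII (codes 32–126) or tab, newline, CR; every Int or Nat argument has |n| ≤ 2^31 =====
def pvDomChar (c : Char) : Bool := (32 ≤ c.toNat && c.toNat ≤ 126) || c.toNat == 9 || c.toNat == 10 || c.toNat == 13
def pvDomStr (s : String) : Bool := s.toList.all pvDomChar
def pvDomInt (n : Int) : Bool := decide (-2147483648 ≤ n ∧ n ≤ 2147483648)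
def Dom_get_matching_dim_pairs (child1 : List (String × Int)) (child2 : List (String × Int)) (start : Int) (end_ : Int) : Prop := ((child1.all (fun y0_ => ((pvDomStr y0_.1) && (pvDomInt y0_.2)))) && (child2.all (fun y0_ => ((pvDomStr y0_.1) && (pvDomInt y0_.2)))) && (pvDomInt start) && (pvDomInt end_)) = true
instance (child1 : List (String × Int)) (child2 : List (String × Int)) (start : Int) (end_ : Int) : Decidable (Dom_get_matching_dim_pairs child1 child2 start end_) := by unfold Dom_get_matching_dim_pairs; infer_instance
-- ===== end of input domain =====

-- B replaces A's precomputed name→indices dictionary by a direct nested scan of the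
-- same range (simpler, no index structure; same output order).


-- ===== PORT A =====
-- literal port of A: build the dict name → list of child2-indices, then scan child1's range
def get_matching_dim_pairs (child1 : List (String × Int)) (child2 : List (String × Int)) (start : Int) (end_ : Int) : List (Int × Int) :=
  let dim_map_child2 : PySem.Dict String (List Int) :=
    (PySem.List.pyRange start end_ 1).foldl (fun d i =>
      let dim_name := (PySem.List.pyGetD child2 i ("", 0)).1
      let d' := if d.contains dim_name then d else d.insert dim_name []
      d'.insert dim_name (d'.getD dim_name [] ++ [i])) PySem.Dict.empty
  (PySem.List.pyRange start end_ 1).foldl (fun acc i =>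
    let dim_name := (PySem.List.pyGetD child1 i ("", 0)).1
    if dim_map_child2.contains dim_name then
      (dim_map_child2.getD dim_name []).foldl (fun acc2 j => acc2 ++ [(i, j)]) acc
    else acc) []

-- ===== PORT B =====
-- literal port of B: nested double loop over the same range
def get_matching_dim_pairs_alt (child1 : List (String × Int)) (child2 : List (String × Int)) (start : Int) (end_ : Int) : List (Int × Int) :=
  (PySem.List.pyRange start end_ 1).foldl (fun acc i =>
    let name := (PySem.List.pyGetD child1 i ("", 0)).1
    (PySem.List.pyRange start end_ 1).foldl (fun acc2 j =>
      if (PySem.List.pyGetD child2 j ("", 0)).1 == name then acc2 ++ [(i, j)] else acc2) acc) []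

-- ===== PRECONDITION & SPEC =====
-- Pre_ excludes exactly the inputs on which Python A raises IndexError: some index in
-- range(start, end) is out of range for child1 or child2 (B raises there as well).
def Pre_get_matching_dim_pairs (child1 : List (String × Int)) (child2 : List (String × Int)) (start : Int) (end_ : Int) : Prop :=
  end_ ≤ start ∨
    (-(child1.length : Int) ≤ start ∧ end_ ≤ (child1.length : Int) ∧
     -(child2.length : Int) ≤ start ∧ end_ ≤ (child2.length : Int))
instance (child1 : List (String × Int)) (child2 : List (String × Int)) (start : Int) (end_ : Int) : Decidable (Pre_get_matching_dim_pairs child1 child2 start end_) := by unfold Pre_get_matching_dim_pairs; infer_instance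

def pvWitness_get_matching_dim_pairs : (List (String × Int)) × (List (String × Int)) × Int × Int :=
  ([("a", 1), ("b", 2)], [("b", 3), ("a", 4)], 0, 2)

def Spec_get_matching_dim_pairs (child1 : List (String × Int)) (child2 : List (String × Int)) (start : Int) (end_ : Int) (out : List (Int × Int)) : Prop := out = get_matching_dim_pairs_alt child1 child2 start end_
instance (child1 : List (String × Int)) (child2 : List (String × Int)) (start : Int) (end_ : Int) (out : List (Int × Int)) : Decidable (Spec_get_matching_dim_pairs child1 child2 start end_ out) := by unfold Spec_get_matching_dim_pairs; infer_instance

-- ===== CLAIM (what is proved, stated in full; the proofs are below) =====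
def Claim_equal_get_matching_dim_pairs : Prop := ∀ (child1 : List (String × Int)) (child2 : List (String × Int)) (start : Int) (end_ : Int), Dom_get_matching_dim_pairs child1 child2 start end_ → Pre_get_matching_dim_pairs child1 child2 start end_ → Spec_get_matching_dim_pairs child1 child2 start end_ (get_matching_dim_pairs child1 child2 start end_)

-- ===== LEMMAS AND PROOFS =====

-- A's dict, looked up at any name, is exactly the range filtered by that name.
theorem build_getD (child2 : List (String × Int)) (js : List Int)
    (d : PySem.Dict String (List Int)) (name : String) :
    (js.foldl (fun d i =>
      let dim_name := (PySem.List.pyGetD child2 i ("", 0)).1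
      let d' := if d.contains dim_name then d else d.insert dim_name []
      d'.insert dim_name (d'.getD dim_name [] ++ [i])) d).getD name []
    = d.getD name [] ++ js.filter (fun j => (PySem.List.pyGetD child2 j ("", 0)).1 == name) := by
  induction js generalizing d with
  | nil => simp
  | cons j js ih =>
    simp only [List.foldl_cons, List.filter_cons]
    rw [ih]
    set n := (PySem.List.pyGetD child2 j ("", 0)).1 with hn
    have hstep : ((if d.contains n then d else d.insert n []).insert n
        ((if d.contains n then d else d.insert n []).getD n [] ++ [j])).getD name []
        = d.getD name [] ++ (if (n == name) then [j] else []) := by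
      by_cases hc : d.contains n
      · simp only [hc, if_true, PySem.Dict.getD_insert]
        by_cases he : name = n
        · subst he; simp
        · simp [he, Ne.symm he, beq_iff_eq]
      · simp only [hc, if_false, Bool.false_eq_true, PySem.Dict.getD_insert,
          PySem.Dict.getD_of_not_contains _ _ (by simpa using hc)]
        by_cases he : name = n
        · subst he; simp [PySem.Dict.getD_of_not_contains _ _ (by simpa using hc : d.contains n = false)]
        · simp [he, Ne.symm he, beq_iff_eq]
    rw [hstep]
    by_cases he : n == name
    · simp [he, List.append_assoc]
    · simp [he]

theorem get_matching_dim_pairs_eq_alt (child1 child2 : List (String × Int)) (start end_ : Int) :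
    get_matching_dim_pairs child1 child2 start end_
      = get_matching_dim_pairs_alt child1 child2 start end_ := by
  unfold get_matching_dim_pairs get_matching_dim_pairs_alt
  apply PySem.List.foldl_congr_mem
  intro acc i _
  simp only []
  set name := (PySem.List.pyGetD child1 i ("", 0)).1 with hname
  have hd := build_getD child2 (PySem.List.pyRange start end_ 1) PySem.Dict.empty name
  rw [PySem.Dict.getD_empty, List.nil_append] at hd
  rw [PySem.List.foldl_append_if]
  by_cases hc : ((PySem.List.pyRange start end_ 1).foldl (fun d i =>
      let dim_name := (PySem.List.pyGetD child2 i ("", 0)).1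
      let d' := if d.contains dim_name then d else d.insert dim_name []
      d'.insert dim_name (d'.getD dim_name [] ++ [i])) PySem.Dict.empty).contains name
  · rw [if_pos hc, PySem.List.foldl_append_singleton_eq_map, hd]
  · rw [if_neg (by simpa using hc)]
    have hnil : ((PySem.List.pyRange start end_ 1).filter
        (fun j => (PySem.List.pyGetD child2 j ("", 0)).1 == name)) = [] := by
      rw [← hd]
      exact PySem.Dict.getD_of_not_contains _ _ (by simpa using hc)
    rw [hnil]; simp

-- ===== VERDICT (by name: the statement is the Claim_ definition above) =====
theorem get_matching_dim_pairs_spec : Claim_equal_get_matching_dim_pairs := by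
  intro child1 child2 start end_ _ _
  unfold Spec_get_matching_dim_pairs
  exact get_matching_dim_pairs_eq_alt child1 child2 start end_
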